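-- pv_equiv track=rewrite | github.com/z-Wind/Python_Challenge | Level32_Nonogram.py | confirmed
-- ===== SOURCE A (Python) =====
-- def confirmedSingle(origin, idx, l):
--     '''檢查 l 中所有 item 的第 idx 項是否一致，不一致則返回原值，否則返回這項的值'''
--     for item in l:
--         if item[idx] != l[0][idx]:
--             return origin
--     return l[0][idx]
--
-- def confirmed(table, hl, vl):
--     '''table 填入所有確定的值'''
--
--     for j, l in enumerate(hl):
--         for i in range(len(l[0])):
--             table[j][i] = confirmedSingle(table[j][i], i, l)
--
--     for i, l in enumerate(vl):
--         for j in range(len(l[0])):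
--             table[j][i] = confirmedSingle(table[j][i], j, l)
--
--     return table
-- ===== SOURCE B (Python) =====
-- def confirmed(table, hl, vl):
--     # Mutates table in place (like the original) and returns it.
--     for j, l in enumerate(hl):
--         first = l[0]
--         broken = set()
--         for item in l[1:]:
--             for i in range(len(first)):
--                 if item[i] != first[i]:
--                     broken.add(i)
--         for i in range(len(first)):
--             if i not in broken:
--                 table[j][i] = first[i]
--     for i, l in enumerate(vl):
--         first = l[0]
--         broken = set()
--         for item in l[1:]:
--             for j in range(len(first)):
--                 if item[j] != first[j]:
--                     broken.add(j)
--         for j in range(len(first)):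
--             if j not in broken:
--                 table[j][i] = first[j]
--     return table
-- ===== Notes on version B (the rewrite author's own statement) =====
-- stated objective: alternative
-- what changed: B swaps the loop nesting inside each line: instead of calling a per-cell scanner that rescans the whole candidate list for every cell (with early return on the first mismatch), B makes one pass over the candidates per line, accumulating a set of 'broken' (disagreeing) cell indices, and then writes only the unbroken cells from the first candidate, leaving broken cells untouched instead of rewriting their old value.
-- outside the precondition, e.g. on confirmed([[7, 7]], [[[1, 2], [9, 9], [1]]], []): A returns [[7, 7]], B raises IndexError
import Mathlib
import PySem

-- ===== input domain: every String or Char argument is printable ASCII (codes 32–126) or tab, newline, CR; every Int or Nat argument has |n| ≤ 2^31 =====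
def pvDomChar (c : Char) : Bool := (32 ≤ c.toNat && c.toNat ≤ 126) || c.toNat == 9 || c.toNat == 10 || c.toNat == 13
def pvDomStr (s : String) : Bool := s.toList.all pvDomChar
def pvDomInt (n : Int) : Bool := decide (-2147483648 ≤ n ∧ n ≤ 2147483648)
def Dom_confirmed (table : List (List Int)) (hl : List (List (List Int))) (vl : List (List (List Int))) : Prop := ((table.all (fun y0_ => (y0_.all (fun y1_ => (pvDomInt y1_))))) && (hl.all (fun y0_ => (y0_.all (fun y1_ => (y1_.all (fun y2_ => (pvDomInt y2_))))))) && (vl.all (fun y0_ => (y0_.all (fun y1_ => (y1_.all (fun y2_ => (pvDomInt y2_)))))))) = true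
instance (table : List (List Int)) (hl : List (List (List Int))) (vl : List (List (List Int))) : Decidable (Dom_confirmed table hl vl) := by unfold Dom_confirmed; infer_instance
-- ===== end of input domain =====

-- B replaces A's per-cell rescanning of each candidate line by a single pass per line that collects a
-- set of disagreeing cell indices and then writes only the agreed cells; both mutate `table` in place
-- in Python (same mutation), and the equivalence is about the returned table.


-- Shared cell access/update on the table (exact under Pre_, which keeps every index in range).
def pvCell (t : List (List Int)) (j i : Nat) : Int := (t.getD j []).getD i 0

def pvSetCell (t : List (List Int)) (j i : Nat) (v : Int) : List (List Int) :=
  t.set j ((t.getD j []).set i v)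

-- ===== PORT A =====
-- `for item in l: if item[idx] != l[0][idx]: return origin` / `return l[0][idx]`
-- (indexing via getD 0: exact under Pre_, where all accessed indices are in range)
def csLoop (origin : Int) (idx : Nat) (fst : List Int) : List (List Int) → Int
  | [] => fst.getD idx 0
  | item :: rest => if item.getD idx 0 ≠ fst.getD idx 0 then origin else csLoop origin idx fst rest

def confirmedSingle (origin : Int) (idx : Nat) (l : List (List Int)) : Int :=
  csLoop origin idx (l.headD []) l

-- `for j, l in enumerate(hl): for i in range(len(l[0])): table[j][i] = confirmedSingle(table[j][i], i, l)`
def hLoopA : List (List (List Int)) → Nat → List (List Int) → List (List Int)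
  | [], _, t => t
  | l :: rest, j, t =>
      hLoopA rest (j + 1)
        ((List.range (l.headD []).length).foldl
          (fun t i => pvSetCell t j i (confirmedSingle (pvCell t j i) i l)) t)

-- `for i, l in enumerate(vl): for j in range(len(l[0])): table[j][i] = confirmedSingle(table[j][i], j, l)`
def vLoopA : List (List (List Int)) → Nat → List (List Int) → List (List Int)
  | [], _, t => t
  | l :: rest, i, t =>
      vLoopA rest (i + 1)
        ((List.range (l.headD []).length).foldl
          (fun t j => pvSetCell t j i (confirmedSingle (pvCell t j i) j l)) t)

def confirmed (table : List (List Int)) (hl : List (List (List Int))) (vl : List (List (List Int))) : List (List Int) :=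
  vLoopA vl 0 (hLoopA hl 0 table)

-- ===== PORT B =====
-- `broken = set(); for item in l[1:]: for k in range(len(first)): if item[k] != first[k]: broken.add(k)`
def brokenLine (fst : List Int) (rest : List (List Int)) : PySem.Set Nat :=
  rest.foldl
    (fun br item =>
      (List.range fst.length).foldl
        (fun br k => if item.getD k 0 ≠ fst.getD k 0 then PySem.Set.add br k else br) br)
    PySem.Set.empty

-- `for k in range(len(first)): if k not in broken: table[j][i] = first[k]` (horizontal: cell (j, k))
def hLoopB : List (List (List Int)) → Nat → List (List Int) → List (List Int)
  | [], _, t => t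
  | l :: rest, j, t =>
      let fst := l.headD []
      let br := brokenLine fst l.tail
      hLoopB rest (j + 1)
        ((List.range fst.length).foldl
          (fun t i => if i ∈ br then t else pvSetCell t j i (fst.getD i 0)) t)

-- vertical: column i, cells (k, i)
def vLoopB : List (List (List Int)) → Nat → List (List Int) → List (List Int)
  | [], _, t => t
  | l :: rest, i, t =>
      let fst := l.headD []
      let br := brokenLine fst l.tail
      vLoopB rest (i + 1)
        ((List.range fst.length).foldl
          (fun t j => if j ∈ br then t else pvSetCell t j i (fst.getD j 0)) t)

def confirmed_alt (table : List (List Int)) (hl : List (List (List Int))) (vl : List (List (List Int))) : List (List Int) :=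
  vLoopB vl 0 (hLoopB hl 0 table)

-- ===== PRECONDITION & SPEC =====
-- Pre_ excludes inputs where Python A raises IndexError (an empty candidate line, a write outside the
-- table) and additionally requires no candidate to be shorter than its line's first candidate: on such
-- short candidates A's completion depends on which out-of-range access is masked by an earlier
-- mismatch's early return — A mostly raises IndexError there, and B (which always scans every
-- candidate up to len(l[0])) raises on all of them.
def Pre_confirmed (table : List (List Int)) (hl : List (List (List Int))) (vl : List (List (List Int))) : Prop :=
  (∀ l ∈ hl, l ≠ [] ∧ ∀ item ∈ l, (l.headD []).length ≤ item.length) ∧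
  (∀ l ∈ vl, l ≠ [] ∧ ∀ item ∈ l, (l.headD []).length ≤ item.length) ∧
  (∀ j < hl.length, ∀ i < ((hl.getD j []).headD []).length,
      j < table.length ∧ i < (table.getD j []).length) ∧
  (∀ i < vl.length, ∀ j < ((vl.getD i []).headD []).length,
      j < table.length ∧ i < (table.getD j []).length)

instance (table : List (List Int)) (hl : List (List (List Int))) (vl : List (List (List Int))) : Decidable (Pre_confirmed table hl vl) := by unfold Pre_confirmed; infer_instance

def pvWitness_confirmed : List (List Int) × List (List (List Int)) × List (List (List Int)) :=
  ([[5, 5], [5, 5]], [[[1, 0], [1, 1]], [[0, 1]]], [[[1, 1]], [[0, 1], [1, 1]]])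

def Spec_confirmed (table : List (List Int)) (hl : List (List (List Int))) (vl : List (List (List Int))) (out : List (List Int)) : Prop := out = confirmed_alt table hl vl
instance (table : List (List Int)) (hl : List (List (List Int))) (vl : List (List (List Int))) (out : List (List Int)) : Decidable (Spec_confirmed table hl vl out) := by unfold Spec_confirmed; infer_instance

-- ===== CLAIM (what is proved, stated in full; the proofs are below) =====
def Claim_equal_confirmed : Prop := ∀ (table : List (List Int)) (hl : List (List (List Int))) (vl : List (List (List Int))), Dom_confirmed table hl vl → Pre_confirmed table hl vl → Spec_confirmed table hl vl (confirmed table hl vl)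

-- ===== LEMMAS AND PROOFS =====

-- shape bookkeeping: pvSetCell never changes the list of row lengths
theorem shape_pvSetCell (t : List (List Int)) (j i : Nat) (v : Int) :
    (pvSetCell t j i v).map List.length = t.map List.length := by
  induction t generalizing j with
  | nil => simp [pvSetCell]
  | cons r rs ih =>
      cases j with
      | zero => simp [pvSetCell]
      | succ j =>
          have := ih j
          simpa [pvSetCell, List.set] using this

theorem rowlen_shape (t : List (List Int)) (j : Nat) :
    (t.getD j []).length = (t.map List.length).getD j 0 := by
  rcases h : t[j]? with _ | r
  · simp [List.getD, h]
  · simp [List.getD, h]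

theorem length_of_shape {t t' : List (List Int)}
    (h : t.map List.length = t'.map List.length) : t.length = t'.length := by
  have := congrArg List.length h
  simpa using this

theorem rowlen_of_shape {t t' : List (List Int)}
    (h : t.map List.length = t'.map List.length) (j : Nat) :
    (t.getD j []).length = (t'.getD j []).length := by
  rw [rowlen_shape, rowlen_shape, h]

-- writing a cell's own value back is the identity (in range)
theorem pvSetCell_cell_self (t : List (List Int)) (j i : Nat)
    (hj : j < t.length) (hi : i < (t.getD j []).length) :
    pvSetCell t j i (pvCell t j i) = t := by
  have hrow : t.getD j [] = t[j] := List.getD_eq_getElem t [] hj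
  have hi' : i < t[j].length := by rwa [hrow] at hi
  unfold pvSetCell pvCell
  rw [hrow, List.getD_eq_getElem _ 0 hi', List.set_getElem_self hi', List.set_getElem_self hj]

-- A's inner scan, characterised: origin iff some candidate disagrees at idx
theorem csLoop_eq (origin : Int) (idx : Nat) (fst : List Int) (l : List (List Int)) :
    csLoop origin idx fst l =
      if ∃ item ∈ l, item.getD idx 0 ≠ fst.getD idx 0 then origin else fst.getD idx 0 := by
  induction l with
  | nil => simp [csLoop]
  | cons a rest ih =>
      show (if a.getD idx 0 ≠ fst.getD idx 0 then origin else csLoop origin idx fst rest) = _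
      by_cases ha : a.getD idx 0 ≠ fst.getD idx 0
      · rw [if_pos ha, if_pos ⟨a, List.mem_cons_self, ha⟩]
      · rw [if_neg ha, ih]
        by_cases hb : ∃ item ∈ rest, item.getD idx 0 ≠ fst.getD idx 0
        · obtain ⟨it, hm, hne⟩ := hb
          rw [if_pos ⟨it, hm, hne⟩, if_pos ⟨it, List.mem_cons_of_mem _ hm, hne⟩]
        · rw [if_neg hb, if_neg (by
            rintro ⟨it, hm, hne⟩
            rcases List.mem_cons.1 hm with rfl | hm
            · exact ha hne
            · exact hb ⟨it, hm, hne⟩)]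

theorem confirmedSingle_cons (origin : Int) (idx : Nat) (f : List Int) (rest : List (List Int)) :
    confirmedSingle origin idx (f :: rest) =
      if ∃ item ∈ rest, item.getD idx 0 ≠ f.getD idx 0 then origin else f.getD idx 0 := by
  unfold confirmedSingle
  rw [List.headD_cons]
  show (if f.getD idx 0 ≠ f.getD idx 0 then origin else csLoop origin idx f rest) = _
  rw [if_neg (by simp), csLoop_eq]

-- B's broken set, characterised
theorem mem_foldl_addIf (P : Nat → Prop) [DecidablePred P] (xs : List Nat)
    (br : PySem.Set Nat) (i : Nat) :
    i ∈ xs.foldl (fun br k => if P k then PySem.Set.add br k else br) br ↔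
      i ∈ br ∨ (i ∈ xs ∧ P i) := by
  induction xs generalizing br with
  | nil => simp
  | cons k ks ih =>
      simp only [List.foldl_cons, ih, List.mem_cons]
      by_cases hk : P k
      · by_cases hik : i = k
        · subst hik; simp [hk, PySem.Set.mem_add]
        · simp [hk, hik, PySem.Set.mem_add]
      · by_cases hik : i = k
        · subst hik; simp [hk]
        · simp [hk, hik]

theorem mem_brokenLine (fst : List Int) (rest : List (List Int)) (i : Nat) :
    i ∈ brokenLine fst rest ↔
      ∃ item ∈ rest, i < fst.length ∧ item.getD i 0 ≠ fst.getD i 0 := by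
  unfold brokenLine
  suffices h : ∀ (rs : List (List Int)) (br : PySem.Set Nat),
      (i ∈ rs.foldl (fun br item =>
          (List.range fst.length).foldl
            (fun br k => if item.getD k 0 ≠ fst.getD k 0 then PySem.Set.add br k else br) br) br ↔
        i ∈ br ∨ ∃ item ∈ rs, i < fst.length ∧ item.getD i 0 ≠ fst.getD i 0) by
    simpa [PySem.Set.empty] using h rest PySem.Set.empty
  intro rs
  induction rs with
  | nil => simp
  | cons a as ih =>
      intro br
      simp only [List.foldl_cons, ih,
        mem_foldl_addIf (fun k => a.getD k 0 ≠ fst.getD k 0) (List.range fst.length) br i,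
        List.mem_range, List.mem_cons]
      constructor
      · rintro ((h | ⟨h1, h2⟩) | ⟨item, hm, h1, h2⟩)
        · exact Or.inl h
        · exact Or.inr ⟨a, Or.inl rfl, h1, h2⟩
        · exact Or.inr ⟨item, Or.inr hm, h1, h2⟩
      · rintro (h | ⟨item, (rfl | hm), h1, h2⟩)
        · exact Or.inl (Or.inl h)
        · exact Or.inl (Or.inr ⟨h1, h2⟩)
        · exact Or.inr ⟨item, hm, h1, h2⟩

-- fold congruence under an invariant
theorem foldl_eq_of_inv {α β : Type} (f g : α → β → α) (inv : α → Prop) :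
    ∀ (xs : List β) (a : α), inv a →
      (∀ a b, inv a → b ∈ xs → f a b = g a b) →
      (∀ a b, inv a → inv (f a b)) →
      xs.foldl f a = xs.foldl g a := by
  intro xs
  induction xs with
  | nil => intro a _ _ _; rfl
  | cons x xs ih =>
      intro a ha hfg hstep
      simp only [List.foldl_cons]
      rw [← hfg a x ha (List.mem_cons_self), ih (f a x) (hstep a x ha)
        (fun a b hb hm => hfg a b hb (List.mem_cons_of_mem _ hm)) hstep]

theorem foldl_inv {α β : Type} (f : α → β → α) (inv : α → Prop) (xs : List β) (a : α)
    (ha : inv a) (hstep : ∀ a b, inv a → inv (f a b)) : inv (xs.foldl f a) := by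
  induction xs generalizing a with
  | nil => exact ha
  | cons x xs ih => exact ih (f a x) (hstep a x ha)

-- one line's worth of updates agree (row/col indices given abstractly via `cellR`/`cellC`)
theorem line_eq (table : List (List Int)) (l : List (List Int))
    (rowOf colOf : Nat → Nat)
    (hrange : ∀ k < (l.headD []).length,
        rowOf k < table.length ∧ colOf k < (table.getD (rowOf k) []).length)
    (t : List (List Int)) (hshape : t.map List.length = table.map List.length) :
    (List.range (l.headD []).length).foldl
        (fun t k => pvSetCell t (rowOf k) (colOf k)
          (confirmedSingle (pvCell t (rowOf k) (colOf k)) k l)) t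
      = (List.range (l.headD []).length).foldl
        (fun t k => if k ∈ brokenLine (l.headD []) l.tail then t
          else pvSetCell t (rowOf k) (colOf k) ((l.headD []).getD k 0)) t := by
  rcases l with _ | ⟨f, rest⟩
  · simp
  · simp only [List.headD_cons, List.tail_cons] at *
    apply foldl_eq_of_inv _ _ (fun t => t.map List.length = table.map List.length) _ t hshape
    · intro t k ht hk
      rw [List.mem_range] at hk
      have hj : rowOf k < t.length := by
        rw [length_of_shape ht]; exact (hrange k hk).1
      have hi : colOf k < (t.getD (rowOf k) []).length := by
        rw [rowlen_of_shape ht]; exact (hrange k hk).2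
      rw [confirmedSingle_cons]
      by_cases hb : ∃ item ∈ rest, item.getD k 0 ≠ f.getD k 0
      · have hbr : k ∈ brokenLine f rest := (mem_brokenLine f rest k).2 (by
          obtain ⟨item, hm, hne⟩ := hb
          exact ⟨item, hm, hk, hne⟩)
        rw [if_pos hb, if_pos hbr, pvSetCell_cell_self t _ _ hj hi]
      · have hbr : k ∉ brokenLine f rest := by
          rw [mem_brokenLine]
          rintro ⟨item, hm, _, hne⟩
          exact hb ⟨item, hm, hne⟩
        rw [if_neg hb, if_neg hbr]
    · intro t k ht
      rw [shape_pvSetCell]; exact ht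

-- both inner loops preserve the shape
theorem shape_fold_A (table t : List (List Int)) (l : List (List Int)) (rowOf colOf : Nat → Nat)
    (hshape : t.map List.length = table.map List.length) :
    ((List.range (l.headD []).length).foldl
        (fun t k => pvSetCell t (rowOf k) (colOf k)
          (confirmedSingle (pvCell t (rowOf k) (colOf k)) k l)) t).map List.length
      = table.map List.length := by
  apply foldl_inv _ (fun t => t.map List.length = table.map List.length) _ t hshape
  intro t k ht
  rw [shape_pvSetCell]; exact ht

theorem hLoop_eq (table : List (List Int)) :
    ∀ (hl' : List (List (List Int))) (j : Nat) (t : List (List Int)),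
      t.map List.length = table.map List.length →
      (∀ k < hl'.length, ∀ i < ((hl'.getD k []).headD []).length,
        (j + k) < table.length ∧ i < (table.getD (j + k) []).length) →
      hLoopA hl' j t = hLoopB hl' j t := by
  intro hl'
  induction hl' with
  | nil => intro j t _ _; rfl
  | cons l rest ih =>
      intro j t hshape hpre
      show hLoopA (l :: rest) j t = hLoopB (l :: rest) j t
      unfold hLoopA hLoopB
      have h0 : ∀ i < (l.headD []).length, j < table.length ∧ i < (table.getD j []).length := by
        intro i hi
        simpa using hpre 0 (Nat.succ_pos _) i (by simpa using hi)
      rw [line_eq table l (fun _ => j) (fun i => i) h0 t hshape]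
      · apply ih (j + 1)
        · rw [← line_eq table l (fun _ => j) (fun i => i) h0 t hshape]
          exact shape_fold_A table t l _ _ hshape
        · intro k hk i hi
          have := hpre (k + 1) (by simp only [List.length_cons]; omega) i (by simpa using hi)
          constructor
          · have h := this.1; omega
          · have h := this.2
            have harith : j + (k + 1) = j + 1 + k := by omega
            rwa [harith] at h

theorem vLoop_eq (table : List (List Int)) :
    ∀ (vl' : List (List (List Int))) (i : Nat) (t : List (List Int)),
      t.map List.length = table.map List.length →
      (∀ k < vl'.length, ∀ j < ((vl'.getD k []).headD []).length,
        j < table.length ∧ (i + k) < (table.getD j []).length) →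
      vLoopA vl' i t = vLoopB vl' i t := by
  intro vl'
  induction vl' with
  | nil => intro i t _ _; rfl
  | cons l rest ih =>
      intro i t hshape hpre
      show vLoopA (l :: rest) i t = vLoopB (l :: rest) i t
      unfold vLoopA vLoopB
      have h0 : ∀ j < (l.headD []).length, j < table.length ∧ i < (table.getD j []).length := by
        intro j hj
        simpa using hpre 0 (Nat.succ_pos _) j (by simpa using hj)
      rw [line_eq table l (fun j => j) (fun _ => i) h0 t hshape]
      · apply ih (i + 1)
        · rw [← line_eq table l (fun j => j) (fun _ => i) h0 t hshape]
          exact shape_fold_A table t l _ _ hshape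
        · intro k hk j hj
          have := hpre (k + 1) (by simp only [List.length_cons]; omega) j (by simpa using hj)
          constructor
          · exact this.1
          · have h := this.2
            have harith : i + (k + 1) = i + 1 + k := by omega
            rwa [harith] at h

theorem shape_hLoopA (table : List (List Int)) :
    ∀ (hl' : List (List (List Int))) (j : Nat) (t : List (List Int)),
      t.map List.length = table.map List.length →
      (hLoopA hl' j t).map List.length = table.map List.length := by
  intro hl'
  induction hl' with
  | nil => intro j t h; exact h
  | cons l rest ih =>
      intro j t h
      exact ih (j + 1) _ (shape_fold_A table t l _ _ h)

-- ===== VERDICT (by name: the statement is the Claim_ definition above) =====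
theorem confirmed_spec : Claim_equal_confirmed := by
  intro table hl vl _ hpre
  obtain ⟨_, _, hH, hV⟩ := hpre
  unfold Spec_confirmed confirmed confirmed_alt
  have hshape0 : table.map List.length = table.map List.length := rfl
  have hH' : ∀ k < hl.length, ∀ i < ((hl.getD k []).headD []).length,
      (0 + k) < table.length ∧ i < (table.getD (0 + k) []).length := by
    intro k hk i hi
    simpa using hH k hk i hi
  rw [hLoop_eq table hl 0 table hshape0 hH']
  have hshape1 : (hLoopB hl 0 table).map List.length = table.map List.length := by
    rw [← hLoop_eq table hl 0 table hshape0 hH']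
    exact shape_hLoopA table hl 0 table hshape0
  apply vLoop_eq table vl 0 _ hshape1
  intro k hk j hj
  simpa using hV k hk j hj
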